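-- pv_equiv track=rewrite | github.com/happycube/ld-decode | vhs_scripts/batch_tests.py | autoLineParams
-- ===== SOURCE A (Python) =====
-- def autoLineParams(params, length=20):
--     split_params = params.split()
--     separator = ' '
--     join_params = separator.join(split_params)
--     if len(join_params) > length:
--         start = 0
--         assy = ''
--         for param in split_params:
--             assy += "%s " % param
--             if len(assy) - start > length:
--                 start = len(assy)
--                 assy = assy.strip() + '\n'
--         join_params = assy.strip()
--     return join_params
-- ===== SOURCE B (Python) =====
-- def autoLineParams(params, length=20):
--     words = params.split()
--     joined = ' '.join(words)
--     if len(joined) <= length: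
--         return joined
--     # prefix sums: pref[m] = total cost (len+1) of the first m words
--     pref = [0]
--     total = 0
--     for w in words:
--         total += len(w) + 1
--         pref.append(total)
--     n = len(words)
--     lines = []
--     i = 0
--     while i < n:
--         # binary search: least e in [i+1, n] with pref[e] > pref[i] + length, else n
--         lo, hi = i + 1, n
--         while lo < hi:
--             mid = (lo + hi) // 2
--             if pref[mid] > pref[i] + length:
--                 hi = mid
--             else:
--                 lo = mid + 1
--         lines.append(' '.join(words[i:lo]))
--         i = lo
--     return '\n'.join(lines)
-- ===== Notes on version B (the rewrite author's own statement) =====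
-- stated objective: alternative
-- what changed: Replaces A's greedy per-word accumulator string (mutating assy with a start offset and strip()+newline splicing) by a staged algorithm: build a prefix-sum array of word costs once, then locate every line break by binary search on that array and slice the word list per line, joining only at the end.
import Mathlib
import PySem

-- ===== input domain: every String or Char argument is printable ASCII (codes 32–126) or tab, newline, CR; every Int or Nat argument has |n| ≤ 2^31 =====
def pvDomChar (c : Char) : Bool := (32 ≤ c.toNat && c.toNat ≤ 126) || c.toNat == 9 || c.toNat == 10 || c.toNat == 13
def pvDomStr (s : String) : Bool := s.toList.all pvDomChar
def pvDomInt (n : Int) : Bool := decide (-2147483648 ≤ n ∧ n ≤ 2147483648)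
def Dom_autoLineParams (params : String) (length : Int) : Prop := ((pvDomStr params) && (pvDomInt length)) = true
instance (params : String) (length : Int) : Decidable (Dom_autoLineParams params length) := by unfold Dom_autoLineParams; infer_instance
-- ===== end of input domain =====

-- B replaces A's greedy accumulator string (start offset, strip()+'\n' splicing) by a staged
-- algorithm: one pass builds prefix sums of word costs, then each line break is found by
-- binary search on the prefix sums and the word list is sliced per line (alternative).

-- ===== PORT A =====
-- A, transliterated; strings handled as List Char via PySem.Chars (exact on the domain).
def autoLineParams (params : String) (length : Int) : String :=
  let split_params := PySem.Chars.split₀ params.toList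
  let separator := [' ']
  let join_params := PySem.Chars.join separator split_params
  if (join_params.length : Int) > length then
    let st := split_params.foldl
      (fun (st : Int × List Char) param =>
        let assy := st.2 ++ param ++ [' ']
        if (assy.length : Int) - st.1 > length then
          ((assy.length : Int), PySem.Chars.strip assy ++ ['\n'])
        else (st.1, assy))
      (0, [])
    String.ofList (PySem.Chars.strip st.2)
  else String.ofList join_params

-- ===== PORT B =====
-- two tiny arithmetic facts cited by the ports' decreasing_by (termination only)
theorem pvMidLt {lo hi : Nat} (h : lo < hi) : (lo + hi) / 2 < hi :=
  Nat.div_lt_of_lt_mul (by rw [Nat.two_mul]; exact Nat.add_lt_add_right h hi)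
theorem pvLeMid {lo hi : Nat} (h : lo < hi) : lo ≤ (lo + hi) / 2 :=
  Nat.le_div_iff_mul_le (by decide) |>.mpr
    (by rw [Nat.mul_two]; exact Nat.add_le_add_left (Nat.le_of_lt h) lo)

-- Source B's inner `while lo < hi` binary search, transliterated (in-range pref[mid] as getD)
def pvBisect (pref : List Int) (target : Int) (lo hi : Nat) : Nat :=
  if _h : lo < hi then
    let mid := (lo + hi) / 2
    if pref.getD mid 0 > target then pvBisect pref target lo mid
    else pvBisect pref target (mid + 1) hi
  else lo
termination_by hi - lo
decreasing_by
  · exact Nat.sub_lt_sub_right (pvLeMid _h) (pvMidLt _h)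
  · exact Nat.sub_lt_sub_left _h (Nat.lt_succ_of_le (pvLeMid _h))

-- lower bound, cited by pvWrap's decreasing_by (the outer `i = lo` strictly advances)
theorem pvBisect_ge (pref : List Int) (target : Int) (lo hi : Nat) :
    lo ≤ pvBisect pref target lo hi := by
  fun_induction pvBisect pref target lo hi with
  | case1 _ _ _ _ _ ih => exact ih
  | case2 _ _ h _ _ ih => exact Nat.le_trans (Nat.le_succ_of_le (pvLeMid h)) ih
  | case3 => exact Nat.le_refl _

-- Source B's outer `while i < n` loop; words[i:lo] (0 ≤ i ≤ lo) is (drop i).take (lo-i)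
def pvWrap (words : List (List Char)) (pref : List Int) (length : Int) (n : Nat)
    (i : Nat) (lines : List (List Char)) : List (List Char) :=
  if _h : i < n then
    let lo := pvBisect pref (pref.getD i 0 + length) (i + 1) n
    pvWrap words pref length n lo
      (lines ++ [PySem.Chars.join [' '] ((words.drop i).take (lo - i))])
  else lines
termination_by n - i
decreasing_by
  exact Nat.sub_lt_sub_left _h
    (Nat.lt_of_succ_le (pvBisect_ge pref (pref.getD i 0 + length) (i + 1) n))

def autoLineParams_alt (params : String) (length : Int) : String :=
  let words := PySem.Chars.split₀ params.toList
  let joined := PySem.Chars.join [' '] words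
  if (joined.length : Int) ≤ length then String.ofList joined
  else
    let pref := (words.foldl
      (fun (st : List Int × Int) w =>
        let total := st.2 + (w.length : Int) + 1
        (st.1 ++ [total], total)) ([0], 0)).1
    let n := words.length
    let lines := pvWrap words pref length n 0 []
    String.ofList (PySem.Chars.join ['\n'] lines)

-- ===== PRECONDITION & SPEC =====
def Spec_autoLineParams (params : String) (length : Int) (out : String) : Prop := out = autoLineParams_alt params length
instance (params : String) (length : Int) (out : String) : Decidable (Spec_autoLineParams params length out) := by unfold Spec_autoLineParams; infer_instance

-- ===== CLAIM (what is proved, stated in full; the proofs are below) =====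
def Claim_equal_autoLineParams : Prop := ∀ (params : String) (length : Int), Dom_autoLineParams params length → Spec_autoLineParams params length (autoLineParams params length)

-- ===== LEMMAS AND PROOFS =====

-- a word produced by split(): nonempty, no whitespace characters
def GoodW (w : List Char) : Prop := w ≠ [] ∧ ∀ c ∈ w, PySem.Chars.isspace c = false
-- first / last character (if any) is not whitespace
def HeadNS (s : List Char) : Prop := ∀ c, s.head? = some c → PySem.Chars.isspace c = false
def LastNS (s : List Char) : Prop := ∀ c, s.getLast? = some c → PySem.Chars.isspace c = false
def GoodL (l : List Char) : Prop := l ≠ [] ∧ HeadNS l ∧ LastNS l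

-- flushed lines / current-line words, laid out exactly as A's accumulator string holds them
def flatL (lines : List (List Char)) : List Char := (lines.map (· ++ ['\n'])).flatten
def flatC (cur : List (List Char)) : List Char := (cur.map (· ++ [' '])).flatten

-- A's loop body (the lambda of port A, named for the lemmas)
def stepA (length : Int) (st : Int × List Char) (param : List Char) : Int × List Char :=
  let assy := st.2 ++ param ++ [' ']
  if (assy.length : Int) - st.1 > length then
    ((assy.length : Int), PySem.Chars.strip assy ++ ['\n'])
  else (st.1, assy)

-- reference greedy state machine both sides are reduced to (proof-only)
def stepB (length : Int) (st : List (List Char) × List (List Char) × Int) (w : List Char) :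
    List (List Char) × List (List Char) × Int :=
  let current := st.2.1 ++ [w]
  let cur_len := st.2.2 + (w.length : Int) + 1
  if cur_len > length then (st.1 ++ [PySem.Chars.join [' '] current], [], 0)
  else (st.1, current, cur_len)

lemma flatL_append_singleton (ls : List (List Char)) (l : List Char) :
    flatL (ls ++ [l]) = flatL ls ++ (l ++ ['\n']) := by
  simp [flatL]

lemma flatC_append_singleton (cs : List (List Char)) (w : List Char) :
    flatC (cs ++ [w]) = flatC cs ++ (w ++ [' ']) := by
  simp [flatC]

-- sep.join(ls + [x]) lays out as the ++sep-flattened prefix followed by x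
lemma join_concat (sep : List Char) (ls : List (List Char)) (x : List Char) :
    PySem.Chars.join sep (ls ++ [x]) = ((ls.map (· ++ sep)).flatten) ++ x := by
  induction ls with
  | nil => simp [PySem.Chars.join_singleton]
  | cons a t ih =>
      cases t with
      | nil => simp [PySem.Chars.join_cons_cons, PySem.Chars.join_singleton]
      | cons b u =>
          simp only [List.cons_append] at ih ⊢
          rw [PySem.Chars.join_cons_cons, ih]
          simp

lemma join_space_concat (cs : List (List Char)) (w : List Char) :
    PySem.Chars.join [' '] (cs ++ [w]) = flatC cs ++ w := join_concat [' '] cs w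

lemma join_nl_concat (ls : List (List Char)) (l : List Char) :
    PySem.Chars.join ['\n'] (ls ++ [l]) = flatL ls ++ l := join_concat ['\n'] ls l

lemma goodW_headNS {w : List Char} (h : GoodW w) : HeadNS w := by
  intro c hc
  exact h.2 c (List.mem_of_mem_head? hc)

lemma goodW_lastNS {w : List Char} (h : GoodW w) : LastNS w := by
  intro c hc
  exact h.2 c (List.mem_of_mem_getLast? hc)

lemma headNS_nil : HeadNS [] := by intro c hc; simp at hc

lemma headNS_append {xs ys : List Char} (hx : HeadNS xs) (hy : HeadNS ys) :
    HeadNS (xs ++ ys) := by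
  cases xs with
  | nil => simpa using hy
  | cons a t =>
      intro c hc
      simp at hc
      exact hx c (by simp [hc])

lemma lastNS_append_right {xs ys : List Char} (hne : ys ≠ []) (hy : LastNS ys) :
    LastNS (xs ++ ys) := by
  intro c hc
  rw [List.getLast?_append_of_ne_nil xs hne] at hc
  exact hy c hc

lemma headNS_flatL {lines : List (List Char)} (h : ∀ l ∈ lines, GoodL l) :
    HeadNS (flatL lines) := by
  induction lines with
  | nil => simpa [flatL] using headNS_nil
  | cons l ls ih =>
      have hl := h l (by simp)
      have hrest : HeadNS (flatL ls) := ih (fun x hx => h x (by simp [hx]))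
      have : flatL (l :: ls) = (l ++ ['\n']) ++ flatL ls := by simp [flatL]
      rw [this]
      refine headNS_append ?_ hrest
      intro c hc
      rw [List.head?_append_of_ne_nil l hl.1] at hc
      exact hl.2.1 c hc

lemma headNS_flatC {cur : List (List Char)} (h : ∀ w ∈ cur, GoodW w) :
    HeadNS (flatC cur) := by
  induction cur with
  | nil => simpa [flatC] using headNS_nil
  | cons w ws ih =>
      have hw := h w (by simp)
      have hrest : HeadNS (flatC ws) := ih (fun x hx => h x (by simp [hx]))
      have : flatC (w :: ws) = (w ++ [' ']) ++ flatC ws := by simp [flatC]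
      rw [this]
      refine headNS_append ?_ hrest
      intro c hc
      rw [List.head?_append_of_ne_nil w hw.1] at hc
      exact goodW_headNS hw c hc

lemma dropWhile_eq_self_of_headNS {r : List Char}
    (h : ∀ c, r.head? = some c → PySem.Chars.isspace c = false) :
    r.dropWhile PySem.Chars.isspace = r := by
  cases r with
  | nil => simp
  | cons a t => simp [h a rfl]

-- stripping a trimmed nonempty string with one trailing whitespace char gives the string back
lemma strip_append_space (xs : List Char) (sp : Char)
    (hsp : PySem.Chars.isspace sp = true) (hne : xs ≠ [])
    (hh : HeadNS xs) (hl : LastNS xs) :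
    PySem.Chars.strip (xs ++ [sp]) = xs := by
  obtain ⟨c, t, rfl⟩ := List.exists_cons_of_ne_nil hne
  have hlstrip : PySem.Chars.lstrip ((c :: t) ++ [sp]) = (c :: t) ++ [sp] := by
    simp [PySem.Chars.lstrip, hh c rfl]
  have hrev : ((c :: t) ++ [sp]).reverse = sp :: (c :: t).reverse := by simp
  have hdrop : ((c :: t).reverse).dropWhile PySem.Chars.isspace = (c :: t).reverse := by
    refine dropWhile_eq_self_of_headNS ?_
    intro d hd
    rw [List.head?_reverse] at hd
    exact hl d hd
  calc PySem.Chars.strip ((c :: t) ++ [sp])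
      = PySem.Chars.rstrip ((c :: t) ++ [sp]) := by
        rw [PySem.Chars.strip, hlstrip]
    _ = (c :: t) := by
        rw [PySem.Chars.rstrip, hrev, List.dropWhile_cons, if_pos hsp, hdrop,
          List.reverse_reverse]

-- every word of Python's str.split() is nonempty and whitespace-free
lemma split₀_go_good (s : List Char) :
    ∀ (cur : List Char) (acc : List (List Char)),
      (∀ c ∈ cur, PySem.Chars.isspace c = false) → (∀ w ∈ acc, GoodW w) →
      ∀ w ∈ PySem.Chars.split₀.go s cur acc, GoodW w := by
  induction s with
  | nil =>
      intro cur acc hcur hacc w hw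
      rw [PySem.Chars.split₀.go] at hw
      by_cases hc : cur.isEmpty
      · simp [hc] at hw
        exact hacc w hw
      · simp [hc] at hw
        rcases hw with hw | hw
        · exact hacc w hw
        · subst hw
          constructor
          · simp [List.isEmpty_iff] at hc
            simpa using hc
          · intro c hcmem
            exact hcur c (by simpa using hcmem)
  | cons a s ih =>
      intro cur acc hcur hacc w hw
      rw [PySem.Chars.split₀.go] at hw
      by_cases hsp : PySem.Chars.isspace a
      · by_cases hc : cur.isEmpty
        · simp [hsp, hc] at hw
          exact ih [] acc (by simp) hacc w hw
        · simp [hsp, hc] at hw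
          refine ih [] (cur.reverse :: acc) (by simp) ?_ w hw
          intro v hv
          rcases List.mem_cons.mp hv with hv | hv
          · subst hv
            constructor
            · simp [List.isEmpty_iff] at hc
              simpa using hc
            · intro c hcmem
              exact hcur c (by simpa using hcmem)
          · exact hacc v hv
      · simp [hsp] at hw
        refine ih (a :: cur) acc ?_ hacc w hw
        intro c hcmem
        rcases List.mem_cons.mp hcmem with h | h
        · subst h; simpa using hsp
        · exact hcur c h

lemma split₀_good (s : List Char) : ∀ w ∈ PySem.Chars.split₀ s, GoodW w := by
  have : PySem.Chars.split₀ s = PySem.Chars.split₀.go s [] [] := rfl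
  rw [this]
  exact split₀_go_good s [] [] (by simp) (by simp)

-- flatC of a nonempty word list is its space-join plus one trailing space
lemma flatC_eq_join {cs : List (List Char)} (h : cs ≠ []) :
    flatC cs = PySem.Chars.join [' '] cs ++ [' '] := by
  obtain ⟨ls, x, rfl⟩ := List.eq_nil_or_concat cs |>.resolve_left h
  rw [List.concat_eq_append, flatC_append_singleton, join_space_concat]
  simp

lemma join_space_goodL {cs : List (List Char)} (hne : cs ≠ [])
    (h : ∀ w ∈ cs, GoodW w) : GoodL (PySem.Chars.join [' '] cs) := by
  obtain ⟨ls, x, rfl⟩ := List.eq_nil_or_concat cs |>.resolve_left hne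
  simp only [List.concat_eq_append] at h ⊢
  rw [join_space_concat]
  have hx : GoodW x := h x (by simp)
  refine ⟨List.append_ne_nil_of_right_ne_nil _ hx.1, ?_, ?_⟩
  · exact headNS_append (headNS_flatC (fun w hw => h w (by simp [hw]))) (goodW_headNS hx)
  · exact lastNS_append_right hx.1 (goodW_lastNS hx)

-- the loop invariant: A's (start, assy) is the greedy state machine laid out flat
lemma loop_eq (length : Int) (ws : List (List Char)) :
    ∀ (lines cur : List (List Char)),
      (∀ w ∈ ws, GoodW w) → (∀ l ∈ lines, GoodL l) → (∀ w ∈ cur, GoodW w) →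
      (∀ l ∈ (ws.foldl (stepB length) (lines, cur, ((flatC cur).length : Int))).1, GoodL l) ∧
      (∀ w ∈ (ws.foldl (stepB length) (lines, cur, ((flatC cur).length : Int))).2.1, GoodW w) ∧
      ws.foldl (stepA length) (((flatL lines).length : Int), flatL lines ++ flatC cur)
        = (((flatL (ws.foldl (stepB length) (lines, cur, ((flatC cur).length : Int))).1).length : Int),
           flatL (ws.foldl (stepB length) (lines, cur, ((flatC cur).length : Int))).1
             ++ flatC (ws.foldl (stepB length) (lines, cur, ((flatC cur).length : Int))).2.1) := by
  induction ws with
  | nil =>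
      intro lines cur _ hlines hcur
      exact ⟨hlines, hcur, by simp⟩
  | cons w ws ih =>
      intro lines cur hws hlines hcur
      have hw : GoodW w := hws w (by simp)
      have hws' : ∀ v ∈ ws, GoodW v := fun v hv => hws v (by simp [hv])
      by_cases hgt : ((flatC cur).length : Int) + (w.length : Int) + 1 > length
      · -- flush
        have hcondA : ((((flatL lines ++ flatC cur) ++ w ++ [' ']).length : Int)
            - ((flatL lines).length : Int) > length) := by
          push_cast [List.length_append, List.length_cons, List.length_nil]
          omega
        have hstrip : PySem.Chars.strip ((flatL lines ++ flatC cur) ++ w ++ [' '])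
            = flatL lines ++ (flatC cur ++ w) := by
          have hxs : flatL lines ++ (flatC cur ++ w) ≠ [] := by
            apply List.append_ne_nil_of_right_ne_nil
            exact List.append_ne_nil_of_right_ne_nil _ hw.1
          have hh : HeadNS (flatL lines ++ (flatC cur ++ w)) :=
            headNS_append (headNS_flatL hlines)
              (headNS_append (headNS_flatC hcur) (goodW_headNS hw))
          have hl : LastNS (flatL lines ++ (flatC cur ++ w)) :=
            lastNS_append_right (List.append_ne_nil_of_right_ne_nil _ hw.1)
              (lastNS_append_right hw.1 (goodW_lastNS hw))
          have : (flatL lines ++ flatC cur) ++ w ++ [' ']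
              = (flatL lines ++ (flatC cur ++ w)) ++ [' '] := by simp
          rw [this]
          exact strip_append_space _ ' ' (by decide) hxs hh hl
        have hstepA : stepA length (((flatL lines).length : Int), flatL lines ++ flatC cur) w
            = ((((flatL lines ++ flatC cur) ++ w ++ [' ']).length : Int),
               flatL (lines ++ [flatC cur ++ w])) := by
          simp only [stepA]
          rw [if_pos hcondA, hstrip, flatL_append_singleton]
          simp
        have hstepB : stepB length (lines, cur, ((flatC cur).length : Int)) w
            = (lines ++ [flatC cur ++ w], [], (0 : Int)) := by
          simp only [stepB]
          rw [if_pos (by simpa using hgt), join_space_concat]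
        have hlines' : ∀ l ∈ lines ++ [flatC cur ++ w], GoodL l := by
          intro l hl
          rcases List.mem_append.mp hl with h | h
          · exact hlines l h
          · simp at h
            subst h
            refine ⟨List.append_ne_nil_of_right_ne_nil _ hw.1, ?_, ?_⟩
            · exact headNS_append (headNS_flatC hcur) (goodW_headNS hw)
            · exact lastNS_append_right hw.1 (goodW_lastNS hw)
        have hlen : (((flatL lines ++ flatC cur) ++ w ++ [' ']).length : Int)
            = ((flatL (lines ++ [flatC cur ++ w])).length : Int) := by
          rw [flatL_append_singleton]
          push_cast [List.length_append, List.length_cons, List.length_nil]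
          omega
        have hrec := ih (lines ++ [flatC cur ++ w]) [] hws' hlines' (by simp)
        have h0 : flatC ([] : List (List Char)) = [] := rfl
        simp only [h0, List.length_nil, Nat.cast_zero, List.append_nil] at hrec
        rw [List.foldl_cons, List.foldl_cons, hstepA, hstepB, hlen]
        exact hrec
      · -- no flush
        have hcondA : ¬ (((((flatL lines ++ flatC cur) ++ w ++ [' ']).length : Int)
            - ((flatL lines).length : Int)) > length) := by
          push_cast [List.length_append, List.length_cons, List.length_nil]
          omega
        have hstepA : stepA length (((flatL lines).length : Int), flatL lines ++ flatC cur) w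
            = (((flatL lines).length : Int), flatL lines ++ flatC (cur ++ [w])) := by
          simp only [stepA]
          rw [if_neg hcondA, flatC_append_singleton]
          simp
        have hstepB : stepB length (lines, cur, ((flatC cur).length : Int)) w
            = (lines, cur ++ [w], ((flatC (cur ++ [w])).length : Int)) := by
          simp only [stepB]
          rw [if_neg (by simpa using hgt)]
          have h3 : ((flatC (cur ++ [w])).length : Int)
              = ((flatC cur).length : Int) + (w.length : Int) + 1 := by
            rw [flatC_append_singleton]
            push_cast [List.length_append, List.length_cons, List.length_nil]
            ring
          rw [h3]
        have hcur' : ∀ v ∈ cur ++ [w], GoodW v := by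
          intro v hv
          rcases List.mem_append.mp hv with h | h
          · exact hcur v h
          · simp at h; subst h; exact hw
        have hrec := ih lines (cur ++ [w]) hws' hlines hcur'
        rw [List.foldl_cons, List.foldl_cons, hstepA, hstepB]
        exact hrec

-- the final strip of A's accumulator is the newline-join of the collected lines
lemma final_eq (r1 r2 : List (List Char))
    (h1 : ∀ l ∈ r1, GoodL l) (h2 : ∀ w ∈ r2, GoodW w) :
    PySem.Chars.strip (flatL r1 ++ flatC r2)
      = PySem.Chars.join ['\n'] (if r2 ≠ [] then r1 ++ [PySem.Chars.join [' '] r2] else r1) := by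
  by_cases hr2 : r2 = []
  · subst hr2
    simp only [ne_eq, not_true_eq_false, if_false, flatC, List.map_nil, List.flatten_nil,
      List.append_nil]
    rcases List.eq_nil_or_concat r1 with h | ⟨ls, l, rfl⟩
    · subst h
      simp [flatL, PySem.Chars.strip, PySem.Chars.lstrip, PySem.Chars.rstrip,
        PySem.Chars.join_nil]
    · simp only [List.concat_eq_append] at h1 ⊢
      rw [flatL_append_singleton, join_nl_concat]
      have hl : GoodL l := h1 l (by simp)
      have : flatL ls ++ (l ++ ['\n']) = (flatL ls ++ l) ++ ['\n'] := by simp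
      rw [this]
      refine strip_append_space _ '\n' (by decide) ?_ ?_ ?_
      · exact List.append_ne_nil_of_right_ne_nil _ hl.1
      · exact headNS_append (headNS_flatL fun x hx => h1 x (by simp [hx])) hl.2.1
      · exact lastNS_append_right hl.1 hl.2.2
  · rw [if_pos hr2, flatC_eq_join hr2, join_nl_concat]
    have hg : GoodL (PySem.Chars.join [' '] r2) := join_space_goodL hr2 h2
    have : flatL r1 ++ (PySem.Chars.join [' '] r2 ++ [' '])
        = (flatL r1 ++ PySem.Chars.join [' '] r2) ++ [' '] := by simp
    rw [this]
    refine strip_append_space _ ' ' (by decide) ?_ ?_ ?_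
    · exact List.append_ne_nil_of_right_ne_nil _ hg.1
    · exact headNS_append (headNS_flatL h1) hg.2.1
    · exact lastNS_append_right hg.1 hg.2.2

-- ===== new layer: B's prefix-sum + binary-search lines equal the greedy lines =====

-- the greedy line list, written as a recursion (proof-only reference)
def glines (length : Int) : List (List Char) → List (List Char) → List (List Char)
  | cur, [] => if cur ≠ [] then [PySem.Chars.join [' '] cur] else []
  | cur, w :: rest =>
      if ((flatC cur).length : Int) + (w.length : Int) + 1 > length then
        PySem.Chars.join [' '] (cur ++ [w]) :: glines length [] rest
      else glines length (cur ++ [w]) rest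

-- the greedy fold's final line list is glines
lemma foldB_eq_glines (length : Int) (ws : List (List Char)) :
    ∀ (lines cur : List (List Char)),
      (if (ws.foldl (stepB length) (lines, cur, ((flatC cur).length : Int))).2.1 ≠ [] then
        (ws.foldl (stepB length) (lines, cur, ((flatC cur).length : Int))).1
          ++ [PySem.Chars.join [' ']
               (ws.foldl (stepB length) (lines, cur, ((flatC cur).length : Int))).2.1]
       else (ws.foldl (stepB length) (lines, cur, ((flatC cur).length : Int))).1)
      = lines ++ glines length cur ws := by
  induction ws with
  | nil =>
      intro lines cur
      simp only [List.foldl_nil, glines]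
      split_ifs <;> simp
  | cons w rest ih =>
      intro lines cur
      by_cases hgt : ((flatC cur).length : Int) + (w.length : Int) + 1 > length
      · have hstepB : stepB length (lines, cur, ((flatC cur).length : Int)) w
            = (lines ++ [PySem.Chars.join [' '] (cur ++ [w])], [], (0 : Int)) := by
          simp only [stepB]
          rw [if_pos (by simpa using hgt)]
        have h0 : (0 : Int) = ((flatC ([] : List (List Char))).length : Int) := by simp [flatC]
        rw [List.foldl_cons, hstepB, h0, ih]
        simp [glines, hgt]
      · have hstepB : stepB length (lines, cur, ((flatC cur).length : Int)) w
            = (lines, cur ++ [w], ((flatC (cur ++ [w])).length : Int)) := by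
          simp only [stepB]
          rw [if_neg (by simpa using hgt)]
          rw [flatC_append_singleton]
          push_cast [List.length_append, List.length_cons, List.length_nil]
          ring_nf
        rw [List.foldl_cons, hstepB, ih]
        simp [glines, hgt]

-- a split of glines at any index k with the greedy-boundary properties
lemma glines_split (length : Int) :
    ∀ (ws cur : List (List Char)) (k : Nat),
      ws ≠ [] → 1 ≤ k → k ≤ ws.length →
      (∀ j, 1 ≤ j → j < k → ¬(((flatC (cur ++ ws.take j)).length : Int) > length)) →
      (k < ws.length → ((flatC (cur ++ ws.take k)).length : Int) > length) →
      glines length cur ws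
        = PySem.Chars.join [' '] (cur ++ ws.take k) :: glines length [] (ws.drop k) := by
  intro ws
  induction ws with
  | nil => intro cur k h; exact absurd rfl h
  | cons w rest ih =>
      intro cur k _ hk1 hklen hbelow hflush
      have hc1 : flatC (cur ++ (w :: rest).take 1) = flatC (cur ++ [w]) := by simp
      by_cases hgt : ((flatC cur).length : Int) + (w.length : Int) + 1 > length
      · -- glines flushes at the first word; k must be 1
        have hcur1 : ((flatC (cur ++ [w])).length : Int)
            = ((flatC cur).length : Int) + (w.length : Int) + 1 := by
          rw [flatC_append_singleton]
          push_cast [List.length_append, List.length_cons, List.length_nil]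
          ring
        have hkeq : k = 1 := by
          by_contra hne
          have h2 : (2 : Nat) ≤ k := by omega
          have := hbelow 1 (by omega) (by omega)
          rw [hc1, hcur1] at this
          exact this hgt
        subst hkeq
        simp only [glines, if_pos hgt]
        simp
      · -- no flush on the first word
        cases rest with
        | nil =>
            have hkeq : k = 1 := by simp at hklen; omega
            subst hkeq
            simp only [glines, if_neg hgt]
            have hne : cur ++ [w] ≠ [] := by simp
            simp [glines, hne]
        | cons w2 rest2 =>
            have hk2 : (2 : Nat) ≤ k := by
              by_contra hlt
              have hkeq : k = 1 := by omega
              subst hkeq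
              have := hflush (by simp)
              rw [hc1] at this
              have hcur1 : ((flatC (cur ++ [w])).length : Int)
                  = ((flatC cur).length : Int) + (w.length : Int) + 1 := by
                rw [flatC_append_singleton]
                push_cast [List.length_append, List.length_cons, List.length_nil]
                ring
              rw [hcur1] at this
              exact hgt this
            obtain ⟨k', rfl⟩ : ∃ k', k = k' + 1 := ⟨k - 1, by omega⟩
            have hfold : glines length cur (w :: w2 :: rest2)
                = glines length (cur ++ [w]) (w2 :: rest2) := by
              have h1 : glines length cur (w :: w2 :: rest2)
                  = (if ((flatC cur).length : Int) + (w.length : Int) + 1 > length then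
                      PySem.Chars.join [' '] (cur ++ [w]) :: glines length [] (w2 :: rest2)
                    else glines length (cur ++ [w]) (w2 :: rest2)) := rfl
              rw [h1, if_neg hgt]
            rw [hfold]
            have hstep : ∀ (j : Nat), cur ++ (w :: w2 :: rest2).take (j + 1)
                = (cur ++ [w]) ++ (w2 :: rest2).take j := by
              intro j; simp
            rw [ih (cur ++ [w]) k' (by simp) (by omega) (by simpa using hklen) ?_ ?_]
            · rw [← hstep k']
              simp
            · intro j hj1 hjk
              have := hbelow (j + 1) (by omega) (by omega)
              rwa [hstep j] at this
            · intro hlt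
              have := hflush (by simpa using hlt)
              rwa [hstep k'] at this

-- binary-search spec: result in [lo, hi], predicate true at result (if < hi), false below
lemma pvBisect_spec_aux (pref : List Int) (target : Int) :
    ∀ (d lo hi : Nat), hi - lo = d → lo ≤ hi →
      (∀ m1 m2, m1 ≤ m2 → m2 ≤ hi → pref.getD m1 0 ≤ pref.getD m2 0) →
      pvBisect pref target lo hi ≤ hi ∧
      (pvBisect pref target lo hi < hi → pref.getD (pvBisect pref target lo hi) 0 > target) ∧
      (∀ m, lo ≤ m → m < pvBisect pref target lo hi → ¬(pref.getD m 0 > target)) := by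
  intro d
  induction d using Nat.strong_induction_on with
  | _ d ih =>
    intro lo hi hd hle hmono
    rw [pvBisect]
    by_cases h : lo < hi
    · simp only [dif_pos h]
      by_cases hp : pref.getD ((lo + hi) / 2) 0 > target
      · simp only [if_pos hp]
        have hmid1 : lo ≤ (lo + hi) / 2 := by omega
        have hmid2 : (lo + hi) / 2 < hi := by omega
        have hrec := ih ((lo + hi) / 2 - lo) (by omega) lo ((lo + hi) / 2) rfl (by omega)
          (fun m1 m2 h12 h2 => hmono m1 m2 h12 (by omega))
        refine ⟨by omega, ?_, hrec.2.2⟩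
        intro hlt
        rcases Nat.lt_or_ge (pvBisect pref target lo ((lo + hi) / 2)) ((lo + hi) / 2) with hc | hc
        · exact hrec.2.1 hc
        · have : pvBisect pref target lo ((lo + hi) / 2) = (lo + hi) / 2 := by omega
          rwa [this]
      · simp only [if_neg hp]
        have hmid2 : (lo + hi) / 2 < hi := by omega
        have hrec := ih (hi - ((lo + hi) / 2 + 1)) (by omega) ((lo + hi) / 2 + 1) hi rfl
          (by omega) hmono
        refine ⟨hrec.1, hrec.2.1, ?_⟩
        intro m hm hmr hPm
        rcases Nat.lt_or_ge m ((lo + hi) / 2 + 1) with hc | hc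
        · exact hp (lt_of_lt_of_le hPm (hmono m ((lo + hi) / 2) (by omega) (by omega)))
        · exact hrec.2.2 m hc hmr hPm
    · simp only [dif_neg h]
      exact ⟨by omega, by omega, fun m hm hmr => by omega⟩

lemma pvBisect_spec (pref : List Int) (target : Int) (lo hi : Nat) (hle : lo ≤ hi)
    (hmono : ∀ m1 m2, m1 ≤ m2 → m2 ≤ hi → pref.getD m1 0 ≤ pref.getD m2 0) :
    pvBisect pref target lo hi ≤ hi ∧
    (pvBisect pref target lo hi < hi → pref.getD (pvBisect pref target lo hi) 0 > target) ∧
    (∀ m, lo ≤ m → m < pvBisect pref target lo hi → ¬(pref.getD m 0 > target)) :=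
  pvBisect_spec_aux pref target (hi - lo) lo hi rfl hle hmono

-- B's prefix-building fold, named
def prefStep : List Int × Int → List Char → List Int × Int :=
  fun st w => (st.1 ++ [st.2 + (w.length : Int) + 1], st.2 + (w.length : Int) + 1)

lemma flatC_append (a b : List (List Char)) : flatC (a ++ b) = flatC a ++ flatC b := by
  simp [flatC]

lemma flatC_cons_len (w : List Char) (l : List (List Char)) :
    ((flatC (w :: l)).length : Int) = (w.length : Int) + 1 + ((flatC l).length : Int) := by
  have : flatC (w :: l) = (w ++ [' ']) ++ flatC l := by simp [flatC]
  rw [this]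
  push_cast [List.length_append, List.length_cons, List.length_nil]
  ring

lemma foldl_prefStep (ws : List (List Char)) :
    ∀ (p : List Int) (t : Int),
      ws.foldl prefStep (p, t)
        = (p ++ (List.range ws.length).map
              (fun j => t + ((flatC (ws.take (j + 1))).length : Int)),
           t + ((flatC ws).length : Int)) := by
  induction ws with
  | nil => intro p t; simp [flatC]
  | cons w rest ih =>
      intro p t
      rw [List.foldl_cons]
      have hstep : prefStep (p, t) w = (p ++ [t + (w.length : Int) + 1], t + (w.length : Int) + 1) := rfl
      rw [hstep, ih]
      simp only [Prod.mk.injEq]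
      refine ⟨?_, ?_⟩
      · rw [List.length_cons, List.range_succ_eq_map]
        simp only [List.map_cons, List.map_map]
        rw [List.append_assoc]
        congr 1
        simp only [List.singleton_append]
        congr 1
        · have : flatC ((w :: rest).take 1) = flatC [w] := by simp
          rw [this]
          have : ((flatC [w]).length : Int) = (w.length : Int) + 1 := by
            rw [flatC_cons_len]; simp [flatC]
          rw [this]
          ring
        · apply List.map_congr_left
          intro j _
          simp only [Function.comp_apply, Nat.succ_eq_add_one]
          have : (w :: rest).take (j + 1 + 1) = w :: rest.take (j + 1) := by simp
          rw [this, flatC_cons_len]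
          ring
      · rw [flatC_cons_len]; ring

lemma pref_getD (ws : List (List Char)) (m : Nat) (hm : m ≤ ws.length) :
    ((ws.foldl prefStep ([0], 0)).1).getD m 0 = ((flatC (ws.take m)).length : Int) := by
  rw [foldl_prefStep]
  cases m with
  | zero => simp [flatC]
  | succ j =>
      have hj : j < ws.length := by omega
      have : (([(0 : Int)] ++ (List.range ws.length).map
          (fun j => 0 + ((flatC (ws.take (j + 1))).length : Int))).getD (j + 1) 0)
          = (((List.range ws.length).map
          (fun j => 0 + ((flatC (ws.take (j + 1))).length : Int))).getD j 0) := by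
        simp [List.getD]
      rw [this, List.getD_eq_getElem _ _ (by simpa using hj)]
      simp

lemma cost_take_mono (ws : List (List Char)) (m1 m2 : Nat) (h : m1 ≤ m2) :
    ((flatC (ws.take m1)).length : Int) ≤ ((flatC (ws.take m2)).length : Int) := by
  have : ws.take m2 = ws.take m1 ++ (ws.drop m1).take (m2 - m1) := by
    rw [← List.take_add]
    congr 1
    omega
  rw [this, flatC_append]
  simp

lemma cost_drop_take (ws : List (List Char)) (i j : Nat) :
    ((flatC ((ws.drop i).take j)).length : Int)
      = ((flatC (ws.take (i + j))).length : Int) - ((flatC (ws.take i)).length : Int) := by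
  rw [List.take_add, flatC_append]
  push_cast [List.length_append]
  ring

-- the outer while loop produces exactly the greedy lines of the remaining words
lemma pvWrap_eq_glines (words : List (List Char)) (length : Int) :
    ∀ (d i : Nat) (lines : List (List Char)), words.length - i = d → i ≤ words.length →
      pvWrap words (words.foldl prefStep ([0], 0)).1 length words.length i lines
        = lines ++ glines length [] (words.drop i) := by
  intro d
  induction d using Nat.strong_induction_on with
  | _ d ih =>
    intro i lines hd hi
    rw [pvWrap]
    by_cases h : i < words.length
    · simp only [dif_pos h]
      have hmono : ∀ m1 m2, m1 ≤ m2 → m2 ≤ words.length →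
          ((words.foldl prefStep ([0], 0)).1).getD m1 0
            ≤ ((words.foldl prefStep ([0], 0)).1).getD m2 0 := by
        intro m1 m2 h12 h2
        rw [pref_getD words m1 (by omega), pref_getD words m2 h2]
        exact cost_take_mono words m1 m2 h12
      obtain ⟨hle, hflush, hbelow⟩ := pvBisect_spec (words.foldl prefStep ([0], 0)).1
        (((words.foldl prefStep ([0], 0)).1).getD i 0 + length) (i + 1) words.length
        (by omega) hmono
      have hge : i + 1 ≤ pvBisect (words.foldl prefStep ([0], 0)).1
          (((words.foldl prefStep ([0], 0)).1).getD i 0 + length) (i + 1) words.length :=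
        pvBisect_ge _ _ _ _
      set e := pvBisect (words.foldl prefStep ([0], 0)).1
          (((words.foldl prefStep ([0], 0)).1).getD i 0 + length) (i + 1) words.length with he
      have hsplit := glines_split length (words.drop i) [] (e - i)
        (by simp [List.drop_eq_nil_iff]; omega) (by omega) (by simp; omega) ?_ ?_
      · rw [ih (words.length - e) (by omega) e _ rfl (by omega)]
        rw [hsplit]
        have hdd : (words.drop i).drop (e - i) = words.drop e := by
          rw [List.drop_drop]
          congr 1
          omega
        rw [hdd]
        simp
      · intro j hj1 hjk
        have hne := hbelow (i + j) (by omega) (by omega)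
        rw [pref_getD words (i + j) (by omega), pref_getD words i (by omega)] at hne
        rw [List.nil_append, cost_drop_take]
        omega
      · intro hlt
        have hlt' : e < words.length := by simp at hlt; omega
        have hP := hflush hlt'
        rw [pref_getD words e (by omega), pref_getD words i (by omega)] at hP
        rw [List.nil_append, cost_drop_take]
        have : i + (e - i) = e := by omega
        rw [this]
        omega
    · simp only [dif_neg h]
      have : words.drop i = [] := by rw [List.drop_eq_nil_iff]; omega
      rw [this]
      simp [glines]

-- ===== VERDICT (by name: the statement is the Claim_ definition above) =====
theorem autoLineParams_spec : Claim_equal_autoLineParams := by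
  intro params length _
  unfold Spec_autoLineParams autoLineParams autoLineParams_alt
  simp only []
  by_cases hlen : ((PySem.Chars.join [' '] (PySem.Chars.split₀ params.toList)).length : Int) > length
  · rw [if_pos hlen, if_neg (by omega)]
    have hgood : ∀ w ∈ PySem.Chars.split₀ params.toList, GoodW w := split₀_good params.toList
    have hA : (PySem.Chars.split₀ params.toList).foldl (fun (st : Int × List Char) param =>
          let assy := st.2 ++ param ++ [' ']
          if (assy.length : Int) - st.1 > length then
            ((assy.length : Int), PySem.Chars.strip assy ++ ['\n'])
          else (st.1, assy)) ((0 : Int), ([] : List Char))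
        = (PySem.Chars.split₀ params.toList).foldl (stepA length) (0, []) := rfl
    have hP : ((PySem.Chars.split₀ params.toList).foldl (fun (st : List Int × Int) w =>
          let total := st.2 + (w.length : Int) + 1
          (st.1 ++ [total], total)) (([(0 : Int)]), (0 : Int)))
        = (PySem.Chars.split₀ params.toList).foldl prefStep ([0], 0) := rfl
    rw [hA, hP]
    have h0C : flatC ([] : List (List Char)) = [] := rfl
    have h0L : flatL ([] : List (List Char)) = [] := rfl
    obtain ⟨hgl, hgw, heq⟩ := loop_eq length (PySem.Chars.split₀ params.toList) [] []
      hgood (by simp) (by simp)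
    simp only [h0C, h0L, List.length_nil, Nat.cast_zero, List.append_nil] at hgl hgw heq
    rw [heq]
    rw [final_eq _ _ hgl hgw]
    have hfold := foldB_eq_glines length (PySem.Chars.split₀ params.toList) [] []
    simp only [h0C, List.length_nil, Nat.cast_zero, List.nil_append] at hfold
    rw [hfold]
    have hwrap := pvWrap_eq_glines (PySem.Chars.split₀ params.toList) length
      ((PySem.Chars.split₀ params.toList).length) 0 [] rfl (by omega)
    simp only [List.drop_zero, List.nil_append] at hwrap
    rw [hwrap]
  · rw [if_neg hlen, if_pos (by omega)]
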